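-- pv_equiv track=rewrite | github.com/Ynewtime/markitai | packages/markitai/src/markitai/cli/logging_config.py | _is_third_party_log
-- ===== SOURCE A (Python) =====
-- INTERCEPTED_LOGGERS = [
--     # LiteLLM and its components
--     "LiteLLM",
--     "LiteLLM Router",
--     "LiteLLM Proxy",
--     "litellm",  # Lowercase variant
--     # HTTP clients
--     "httpx",
--     "httpcore",
--     "urllib3",
--     # Instructor (structured output)
--     "instructor",
--     # Playwright (including sub-loggers)
--     "playwright",
--     "playwright.sync_api",
--     "playwright.async_api",
--     # Document processing
--     "markitdown",
--     "markitdown._markitdown",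
--     "pymupdf",
--     "fitz",
--     # OCR
--     "rapidocr",
--     "rapidocr_onnxruntime",
--     "onnxruntime",
--     # Audio (pydub uses logging)
--     "pydub",
--     # OpenAI client
--     "openai",
--     # Other
--     "PIL",
--     "PIL.Image",
--     "charset_normalizer",
--     # Async/concurrent
--     "asyncio",
--     "concurrent.futures",
-- ]
--
-- def _is_third_party_log(name: str, module: str) -> bool:
--     """Check if a log comes from a third-party library.
--
--     Uses exact prefix matching instead of substring matching
--     to avoid false positives (e.g., "PIL" matching "compiler").
--
--     Args:
--         name: Logger name (e.g., "httpx.client")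
--         module: Module name (e.g., "client")
--
--     Returns:
--         True if the log is from a known third-party library
--     """
--     name_lower = name.lower()
--     module_lower = module.lower()
--
--     for intercepted in INTERCEPTED_LOGGERS:
--         intercepted_lower = intercepted.lower()
--         # Exact match or prefix match with dot separator
--         # e.g., "httpx" matches "httpx" and "httpx.client"
--         if name_lower == intercepted_lower or name_lower.startswith(
--             f"{intercepted_lower}."
--         ):
--             return True
--         # Module exact match
--         if module_lower == intercepted_lower:
--             return True
--
--     return False
-- ===== SOURCE B (Python) =====
-- INTERCEPTED_LOGGERS = [
--     "LiteLLM",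
--     "LiteLLM Router",
--     "LiteLLM Proxy",
--     "litellm",
--     "httpx",
--     "httpcore",
--     "urllib3",
--     "instructor",
--     "playwright",
--     "playwright.sync_api",
--     "playwright.async_api",
--     "markitdown",
--     "markitdown._markitdown",
--     "pymupdf",
--     "fitz",
--     "rapidocr",
--     "rapidocr_onnxruntime",
--     "onnxruntime",
--     "pydub",
--     "openai",
--     "PIL",
--     "PIL.Image",
--     "charset_normalizer",
--     "asyncio",
--     "concurrent.futures",
-- ]
--
-- _INTERCEPTED_SET = frozenset(x.lower() for x in INTERCEPTED_LOGGERS)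
--
--
-- def _is_third_party_log(name: str, module: str) -> bool:
--     """Set-based variant: test module exactly, then every dot-prefix of name."""
--     s = _INTERCEPTED_SET
--     if module.lower() in s:
--         return True
--     nl = name.lower()
--     if nl in s:
--         return True
--     for i, ch in enumerate(nl):
--         if ch == "." and nl[:i] in s:
--             return True
--     return False
-- ===== Notes on version B (the rewrite author's own statement) =====
-- stated objective: alternative
-- what changed: Replaces the scan over the library list with per-entry lower()+startswith checks by one frozenset of lowercased names probed with the module and with each dot-delimited prefix of the name.
import Mathlib
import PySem

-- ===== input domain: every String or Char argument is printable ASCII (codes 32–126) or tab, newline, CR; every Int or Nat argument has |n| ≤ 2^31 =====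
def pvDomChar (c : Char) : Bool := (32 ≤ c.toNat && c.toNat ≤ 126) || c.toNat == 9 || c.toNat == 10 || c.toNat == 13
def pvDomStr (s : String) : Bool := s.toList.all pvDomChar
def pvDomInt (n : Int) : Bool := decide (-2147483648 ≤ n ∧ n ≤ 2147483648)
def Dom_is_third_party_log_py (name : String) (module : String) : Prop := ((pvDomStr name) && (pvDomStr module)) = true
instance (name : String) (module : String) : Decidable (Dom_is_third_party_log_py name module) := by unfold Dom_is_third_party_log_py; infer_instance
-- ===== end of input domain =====

-- B replaces A's scan of the library list with startswith by a set of lowercased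
-- names tested against the module and each dot-prefix of the name (objective: alternative).

def INTERCEPTED_LOGGERS : List String :=
  ["LiteLLM", "LiteLLM Router", "LiteLLM Proxy", "litellm",
   "httpx", "httpcore", "urllib3", "instructor",
   "playwright", "playwright.sync_api", "playwright.async_api",
   "markitdown", "markitdown._markitdown", "pymupdf", "fitz",
   "rapidocr", "rapidocr_onnxruntime", "onnxruntime",
   "pydub", "openai", "PIL", "PIL.Image", "charset_normalizer",
   "asyncio", "concurrent.futures"]

-- ===== PORT A =====
-- loop over INTERCEPTED_LOGGERS with early return = List.any; strings as List Char
def is_third_party_log_py (name : String) (module : String) : Bool :=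
  let name_lower := PySem.Chars.lower name.toList
  let module_lower := PySem.Chars.lower module.toList
  INTERCEPTED_LOGGERS.any (fun intercepted =>
    let intercepted_lower := PySem.Chars.lower intercepted.toList
    (name_lower == intercepted_lower
      || PySem.Chars.startswith name_lower (intercepted_lower ++ ['.']))
    || module_lower == intercepted_lower)

-- ===== PORT B =====
def interceptedSet : PySem.Set (List Char) :=
  PySem.Set.ofList (INTERCEPTED_LOGGERS.map (fun x => PySem.Chars.lower x.toList))

def is_third_party_log_py_alt (name : String) (module : String) : Bool :=
  let s := interceptedSet
  PySem.Set.contains s (PySem.Chars.lower module.toList)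
  || (let nl := PySem.Chars.lower name.toList
      PySem.Set.contains s nl
      || (PySem.List.enumerate nl 0).any (fun p =>
            p.2 == '.' && PySem.Set.contains s (PySem.List.slice nl none (some p.1))))

-- ===== PRECONDITION & SPEC =====
def Spec_is_third_party_log_py (name : String) (module : String) (out : Bool) : Prop := out = is_third_party_log_py_alt name module
instance (name : String) (module : String) (out : Bool) : Decidable (Spec_is_third_party_log_py name module out) := by unfold Spec_is_third_party_log_py; infer_instance

-- ===== CLAIM (what is proved, stated in full; the proofs are below) =====
def Claim_equal_is_third_party_log_py : Prop := ∀ (name : String) (module : String), Dom_is_third_party_log_py name module → Spec_is_third_party_log_py name module (is_third_party_log_py name module)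

-- ===== LEMMAS AND PROOFS =====

-- "il followed by a dot is a prefix of nl" ↔ "some dot in nl cuts off exactly il"
theorem prefix_dot_iff (il nl : List Char) :
    (il ++ ['.']) <+: nl ↔ ∃ k, ∃ _ : k < nl.length, nl[k] = '.' ∧ nl.take k = il := by
  constructor
  · rintro ⟨t, ht⟩
    subst ht
    refine ⟨il.length, by simp, ?_, ?_⟩
    · simp
    · simp
  · rintro ⟨k, hk, hdot, htake⟩
    refine ⟨nl.drop (k + 1), ?_⟩
    subst htake
    conv_rhs => rw [← List.take_append_drop k nl]
    rw [List.drop_eq_getElem_cons hk, hdot]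
    simp

theorem ports_agree (name module : String) :
    is_third_party_log_py name module = is_third_party_log_py_alt name module := by
  rw [Bool.eq_iff_iff]
  unfold is_third_party_log_py is_third_party_log_py_alt interceptedSet
  simp only [List.any_eq_true, Bool.or_eq_true, Bool.and_eq_true, beq_iff_eq,
    PySem.Chars.startswith_iff, PySem.Set.contains_iff, PySem.Set.mem_ofList,
    List.mem_map, PySem.List.mem_enumerate_iff, prefix_dot_iff, zero_add]
  constructor
  · rintro ⟨x, hx, ((h | ⟨k, hk, hdot, htake⟩) | h)⟩
    · exact Or.inr (Or.inl ⟨x, hx, h.symm⟩)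
    · refine Or.inr (Or.inr ⟨((k : Int), (PySem.Chars.lower name.toList)[k]),
        ⟨k, hk, rfl⟩, hdot, ?_⟩)
      have h2 : PySem.List.slice (PySem.Chars.lower name.toList) none
          (some ((k : Int), (PySem.Chars.lower name.toList)[k]).1)
          = List.take k (PySem.Chars.lower name.toList) :=
        PySem.List.slice_to_natCast _ _
      rw [h2, htake]
      exact ⟨x, hx, rfl⟩
    · exact Or.inl ⟨x, hx, h.symm⟩
  · rintro (⟨x, hx, h⟩ | ⟨x, hx, h⟩ | ⟨p, ⟨k, hk, hp⟩, hdot, hmem⟩)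
    · exact ⟨x, hx, Or.inr h.symm⟩
    · exact ⟨x, hx, Or.inl (Or.inl h.symm)⟩
    · subst hp
      have h2 : PySem.List.slice (PySem.Chars.lower name.toList) none
          (some ((k : Int), (PySem.Chars.lower name.toList)[k]).1)
          = List.take k (PySem.Chars.lower name.toList) :=
        PySem.List.slice_to_natCast _ _
      rw [h2] at hmem
      obtain ⟨x, hx, hxeq⟩ := hmem
      exact ⟨x, hx, Or.inl (Or.inr ⟨k, hk, hdot, hxeq.symm⟩)⟩

-- ===== VERDICT (by name: the statement is the Claim_ definition above) =====
theorem is_third_party_log_py_spec : Claim_equal_is_third_party_log_py := by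
  intro name module _
  exact (ports_agree name module)
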